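-- pv_equiv track=rewrite | github.com/consciousness-lab/ctm-ai | exp_affective/run_ctm_ablation.py | parse_ablation_flags
-- ===== SOURCE A (Python) =====
-- def parse_ablation_flags(ablation_list):
--     flags = {
--         'enable_fusion': True,
--         'enable_uptree_competition': True,
--         'enable_downtree_broadcast': True,
--         'enable_link_form': True,
--         'enable_iteration': True,
--     }
--     mapping = {
--         'no_fusion': 'enable_fusion',
--         'no_uptree': 'enable_uptree_competition',
--         'no_broadcast': 'enable_downtree_broadcast',
--         'no_link_form': 'enable_link_form',
--         'single_iter': 'enable_iteration',
--     }
--     for ablation in ablation_list: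
--         flags[mapping[ablation]] = False
--     return flags
-- ===== SOURCE B (Python) =====
-- def parse_ablation_flags(ablation_list):
--     bit = {'no_fusion': 1, 'no_uptree': 2, 'no_broadcast': 4,
--            'no_link_form': 8, 'single_iter': 16}
--     mask = 0
--     for ablation in ablation_list:
--         mask |= bit[ablation]
--     names = ['enable_fusion', 'enable_uptree_competition',
--              'enable_downtree_broadcast', 'enable_link_form', 'enable_iteration']
--     return {name: not (mask >> i) & 1 for i, name in enumerate(names)}
-- ===== Notes on version B (the rewrite author's own statement) =====
-- stated objective: alternative
-- what changed: B accumulates a 5-bit integer mask (one OR per ablation name) instead of mutating a flags dict, then builds the result by shifting/testing bits while enumerating the five flag names; Pre_ excludes lists containing an unknown ablation name, on which both A and B raise KeyError.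
import Mathlib
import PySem

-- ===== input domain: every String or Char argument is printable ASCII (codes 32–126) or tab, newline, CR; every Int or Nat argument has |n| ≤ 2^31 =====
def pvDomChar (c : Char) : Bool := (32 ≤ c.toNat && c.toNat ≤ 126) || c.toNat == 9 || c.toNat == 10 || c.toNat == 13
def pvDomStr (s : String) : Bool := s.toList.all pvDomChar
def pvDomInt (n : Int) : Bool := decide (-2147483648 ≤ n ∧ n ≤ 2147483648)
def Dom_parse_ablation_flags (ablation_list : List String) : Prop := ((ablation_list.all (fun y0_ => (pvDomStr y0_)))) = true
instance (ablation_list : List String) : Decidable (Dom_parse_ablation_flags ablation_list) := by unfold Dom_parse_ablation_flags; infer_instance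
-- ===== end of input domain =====

-- B replaces A's in-place dict-mutation loop by accumulating a 5-bit integer mask and then
-- building the flags from bit tests (objective: alternative); return-value equivalence.

-- ===== PORT A =====
def pvMappingA : PySem.Dict String String := PySem.Dict.ofList
  [("no_fusion", "enable_fusion"), ("no_uptree", "enable_uptree_competition"),
   ("no_broadcast", "enable_downtree_broadcast"), ("no_link_form", "enable_link_form"),
   ("single_iter", "enable_iteration")]

-- loop body: flags[mapping[ablation]] = False.  mapping[ablation] raises KeyError on an unknown
-- name — Pre_ excludes those inputs, so the '.getD ""' default is never reached inside Pre_.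
def pvStepA (flags : PySem.Dict String Bool) (ablation : String) : PySem.Dict String Bool :=
  flags.insert ((pvMappingA.get? ablation).getD "") false

def parse_ablation_flags (ablation_list : List String) : List (String × Bool) :=
  (ablation_list.foldl pvStepA
    (PySem.Dict.ofList
      [("enable_fusion", true), ("enable_uptree_competition", true),
       ("enable_downtree_broadcast", true), ("enable_link_form", true),
       ("enable_iteration", true)])).items

-- ===== PORT B =====
-- bit[ablation] raises KeyError on an unknown name exactly as in A: the '.getD 0' default is
-- never reached inside Pre_.
def pvBitB : PySem.Dict String Nat := PySem.Dict.ofList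
  [("no_fusion", 1), ("no_uptree", 2), ("no_broadcast", 4),
   ("no_link_form", 8), ("single_iter", 16)]

def pvNamesB : List String :=
  ["enable_fusion", "enable_uptree_competition", "enable_downtree_broadcast",
   "enable_link_form", "enable_iteration"]

def parse_ablation_flags_alt (ablation_list : List String) : List (String × Bool) :=
  let mask : Nat :=
    ablation_list.foldl (fun m ablation => m ||| (pvBitB.get? ablation).getD 0) 0
  (PySem.List.enumerate pvNamesB).map
    (fun p => (p.2, decide (((mask >>> p.1.toNat) &&& 1) = 0)))

-- ===== PRECONDITION & SPEC =====
-- Pre_ excludes exactly the inputs on which the Python A raises KeyError: a list element that is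
-- not one of the five ablation names (B raises the same KeyError there).
def Pre_parse_ablation_flags (ablation_list : List String) : Prop :=
  ∀ a ∈ ablation_list,
    a ∈ ["no_fusion", "no_uptree", "no_broadcast", "no_link_form", "single_iter"]
instance (ablation_list : List String) : Decidable (Pre_parse_ablation_flags ablation_list) := by
  unfold Pre_parse_ablation_flags; infer_instance
def pvWitness_parse_ablation_flags : List String := ["no_uptree", "single_iter", "no_uptree"]

def Spec_parse_ablation_flags (ablation_list : List String) (out : List (String × Bool)) : Prop := out = parse_ablation_flags_alt ablation_list
instance (ablation_list : List String) (out : List (String × Bool)) : Decidable (Spec_parse_ablation_flags ablation_list out) := by unfold Spec_parse_ablation_flags; infer_instance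

-- ===== CLAIM (what is proved, stated in full; the proofs are below) =====
def Claim_equal_parse_ablation_flags : Prop := ∀ (ablation_list : List String), Dom_parse_ablation_flags ablation_list → Pre_parse_ablation_flags ablation_list → Spec_parse_ablation_flags ablation_list (parse_ablation_flags ablation_list)

-- ===== LEMMAS AND PROOFS =====

-- the five-flag state A's loop threads, as a function of the five booleans
def pvFlags (b1 b2 b3 b4 b5 : Bool) : PySem.Dict String Bool :=
  PySem.Dict.mk
    [("enable_fusion", b1), ("enable_uptree_competition", b2),
     ("enable_downtree_broadcast", b3), ("enable_link_form", b4),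
     ("enable_iteration", b5)]

-- A's loop over a valid list, started from any five flag values, clears exactly the flags named
-- in the list.
lemma foldA_closed (l : List String)
    (h : ∀ a ∈ l, a ∈ ["no_fusion", "no_uptree", "no_broadcast", "no_link_form", "single_iter"])
    (b1 b2 b3 b4 b5 : Bool) :
    l.foldl pvStepA (pvFlags b1 b2 b3 b4 b5) =
      pvFlags (b1 && !(l.contains "no_fusion")) (b2 && !(l.contains "no_uptree"))
        (b3 && !(l.contains "no_broadcast")) (b4 && !(l.contains "no_link_form"))
        (b5 && !(l.contains "single_iter")) := by
  induction l generalizing b1 b2 b3 b4 b5 with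
  | nil => simp
  | cons a t ih =>
    have ht : ∀ x ∈ t, x ∈ ["no_fusion", "no_uptree", "no_broadcast", "no_link_form", "single_iter"] :=
      fun x hx => h x (List.mem_cons_of_mem _ hx)
    have ha := h a (List.mem_cons_self ..)
    fin_cases ha <;>
      simp only [List.foldl_cons,
        show ∀ b1 b2 b3 b4 b5, pvStepA (pvFlags b1 b2 b3 b4 b5) "no_fusion" = pvFlags false b2 b3 b4 b5 from fun _ _ _ _ _ => rfl,
        show ∀ b1 b2 b3 b4 b5, pvStepA (pvFlags b1 b2 b3 b4 b5) "no_uptree" = pvFlags b1 false b3 b4 b5 from fun _ _ _ _ _ => rfl,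
        show ∀ b1 b2 b3 b4 b5, pvStepA (pvFlags b1 b2 b3 b4 b5) "no_broadcast" = pvFlags b1 b2 false b4 b5 from fun _ _ _ _ _ => rfl,
        show ∀ b1 b2 b3 b4 b5, pvStepA (pvFlags b1 b2 b3 b4 b5) "no_link_form" = pvFlags b1 b2 b3 false b5 from fun _ _ _ _ _ => rfl,
        show ∀ b1 b2 b3 b4 b5, pvStepA (pvFlags b1 b2 b3 b4 b5) "single_iter" = pvFlags b1 b2 b3 b4 false from fun _ _ _ _ _ => rfl,
        ih ht] <;>
      simp

-- the closed form of B's mask: one bit per ablation name occurring in the list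
def pvMaskOf (l : List String) : Nat :=
  (cond (l.contains "no_fusion") 1 0) ||| (cond (l.contains "no_uptree") 2 0) |||
  (cond (l.contains "no_broadcast") 4 0) ||| (cond (l.contains "no_link_form") 8 0) |||
  (cond (l.contains "single_iter") 16 0)

-- B's OR-accumulation over a valid list, started from any mask, ORs in exactly pvMaskOf l.
lemma foldB_closed (l : List String)
    (h : ∀ a ∈ l, a ∈ ["no_fusion", "no_uptree", "no_broadcast", "no_link_form", "single_iter"])
    (m : Nat) :
    l.foldl (fun m ablation => m ||| (pvBitB.get? ablation).getD 0) m = m ||| pvMaskOf l := by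
  induction l generalizing m with
  | nil => simp [pvMaskOf]
  | cons a t ih =>
    have ht : ∀ x ∈ t, x ∈ ["no_fusion", "no_uptree", "no_broadcast", "no_link_form", "single_iter"] :=
      fun x hx => h x (List.mem_cons_of_mem _ hx)
    have ha := h a (List.mem_cons_self ..)
    rw [List.foldl_cons, ih ht, Nat.or_assoc]
    congr 1
    fin_cases ha <;>
      simp only [pvMaskOf, List.contains_cons] <;>
      cases t.contains "no_fusion" <;> cases t.contains "no_uptree" <;>
      cases t.contains "no_broadcast" <;> cases t.contains "no_link_form" <;>
      cases t.contains "single_iter" <;> rfl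

-- ===== VERDICT (by name: the statement is the Claim_ definition above) =====
theorem parse_ablation_flags_spec : Claim_equal_parse_ablation_flags := by
  intro l _ hpre
  unfold Spec_parse_ablation_flags parse_ablation_flags parse_ablation_flags_alt
  rw [show (PySem.Dict.ofList
      [("enable_fusion", true), ("enable_uptree_competition", true),
       ("enable_downtree_broadcast", true), ("enable_link_form", true),
       ("enable_iteration", true)]) = pvFlags true true true true true from rfl,
    foldA_closed l hpre]
  simp only [foldB_closed l hpre 0, Nat.zero_or]
  unfold pvMaskOf
  cases l.contains "no_fusion" <;> cases l.contains "no_uptree" <;>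
    cases l.contains "no_broadcast" <;> cases l.contains "no_link_form" <;>
    cases l.contains "single_iter" <;> rfl
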